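-- pv_equiv track=rewrite | github.com/BartTych/Pictures | functional_filters.py | check_for_copies_without_date
-- ===== SOURCE A (Python) =====
-- from collections import defaultdict
--
-- def check_for_copies_without_date(file_list):
--
--     file_list = [n for n in file_list if n['date']!= None]
--     # Group by hash
--     hash_groups = defaultdict(list)
--     for img in file_list:
--         hash_groups[img['hash']].append(img)
--
--     group_lenght = {}
--     same_date = 0
--     missing_date = 0
--     for group in hash_groups.values():
--         group_lenght[len(group)] = group_lenght.get(len(group),0) + 1
--         if all([g['date']!= None for g in group]):
--             same_date += 1
--         else:
--             missing_date += 1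
--
--     return same_date, missing_date, group_lenght
-- ===== SOURCE B (Python) =====
-- def check_for_copies_without_date(file_list):
--     hashes = [img['hash'] for img in file_list if img['date'] != None]
--     firsts = [h for i, h in enumerate(hashes) if h not in hashes[:i]]
--     sizes = [hashes.count(h) for h in firsts]
--     uniq = [c for i, c in enumerate(sizes) if c not in sizes[:i]]
--     return len(firsts), 0, {c: sizes.count(c) for c in uniq}
-- ===== Notes on version B (the rewrite author's own statement) =====
-- stated objective: alternative
-- what changed: B drops the defaultdict grouping and the second loop with its all() scan entirely: it lists the hashes of date-bearing images, takes their first occurrences by an index scan (h not in hashes[:i]), computes each group size with list.count, and builds the histogram the same way over the size list — pure list scans with no dict/Counter accumulator; missing_date is the constant 0 since the prefilter removes every dateless image.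
import Mathlib
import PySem

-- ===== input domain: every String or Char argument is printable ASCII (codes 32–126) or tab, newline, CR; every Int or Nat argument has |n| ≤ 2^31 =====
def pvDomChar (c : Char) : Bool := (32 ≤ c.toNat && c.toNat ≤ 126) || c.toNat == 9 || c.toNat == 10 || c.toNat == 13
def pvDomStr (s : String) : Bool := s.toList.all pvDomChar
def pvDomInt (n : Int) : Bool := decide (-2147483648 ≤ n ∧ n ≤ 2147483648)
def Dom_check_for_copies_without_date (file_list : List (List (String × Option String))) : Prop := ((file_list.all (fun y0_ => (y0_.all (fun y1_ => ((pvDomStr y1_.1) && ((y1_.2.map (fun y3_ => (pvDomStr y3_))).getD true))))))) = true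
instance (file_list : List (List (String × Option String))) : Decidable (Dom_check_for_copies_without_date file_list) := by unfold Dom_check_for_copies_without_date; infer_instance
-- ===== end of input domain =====

-- B replaces the defaultdict grouping and the second loop (with its all() scan) by plain list
-- scans: first occurrences via 'h not in hashes[:i]' and group sizes via list.count — no
-- dict/Counter accumulator at all (an alternative decomposition, not faster).

-- ===== PORT A =====
-- img['date'] != None (under Pre_ the key is present, so getD reads the stored value)
def pvHasDate (img : List (String × Option String)) : Bool :=
  ((PySem.Dict.mk img).getD "date" none).isSome

-- img['hash'] (under Pre_ the key is present for every image that survives the date filter)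
def pvHashKey (img : List (String × Option String)) : Option String :=
  (PySem.Dict.mk img).getD "hash" none

def check_for_copies_without_date (file_list : List (List (String × Option String))) : Int × Int × (List (Int × Int)) :=
  let fl := file_list.filter (fun n => pvHasDate n)
  let hash_groups :=
    fl.foldl (fun d img => d.modify (pvHashKey img) [] (fun g => g ++ [img]))
      (PySem.Dict.empty : PySem.Dict (Option String) (List (List (String × Option String))))
  let res := hash_groups.values.foldl
    (fun (st : PySem.Dict Int Int × Int × Int) group =>
      let gl := st.1.insert (group.length : Int) (st.1.getD (group.length : Int) 0 + 1)
      if group.all (fun g => pvHasDate g) then (gl, st.2.1 + 1, st.2.2)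
      else (gl, st.2.1, st.2.2 + 1))
    ((PySem.Dict.empty : PySem.Dict Int Int), 0, 0)
  (res.2.1, res.2.2, res.1.items)

-- ===== PORT B =====
-- hashes[:i] with i ≥ 0 (i comes from enumerate) is the i-prefix, hence List.take p.1.toNat;
-- the final dict comprehension has distinct keys (uniq is duplicate-free), so its association
-- list in insertion order is exactly the map over uniq.
def check_for_copies_without_date_alt (file_list : List (List (String × Option String))) : Int × Int × (List (Int × Int)) :=
  let hashes := (file_list.filter (fun img => pvHasDate img)).map (fun img => pvHashKey img)
  let firsts := ((PySem.List.enumerate hashes).filter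
      (fun p => !((hashes.take p.1.toNat).contains p.2))).map (fun p => p.2)
  let sizes := firsts.map (fun h => (PySem.List.count hashes h : Int))
  let uniq := ((PySem.List.enumerate sizes).filter
      (fun p => !((sizes.take p.1.toNat).contains p.2))).map (fun p => p.2)
  ((firsts.length : Int), 0, uniq.map (fun c => (c, (PySem.List.count sizes c : Int))))

-- ===== PRECONDITION & SPEC =====
-- Pre_ excludes exactly the inputs on which the Python A raises KeyError: an image without a
-- 'date' key, or an image with a non-None date but no 'hash' key.
def Pre_check_for_copies_without_date (file_list : List (List (String × Option String))) : Prop :=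
  ∀ img ∈ file_list,
    (PySem.Dict.mk img).contains "date" = true ∧
    (((PySem.Dict.mk img).getD "date" none).isSome = true → (PySem.Dict.mk img).contains "hash" = true)
instance (file_list : List (List (String × Option String))) : Decidable (Pre_check_for_copies_without_date file_list) := by unfold Pre_check_for_copies_without_date; infer_instance

def pvWitness_check_for_copies_without_date : (List (List (String × Option String))) :=
  [[("date", some "d"), ("hash", some "h")], [("date", none)]]

def Spec_check_for_copies_without_date (file_list : List (List (String × Option String))) (out : Int × Int × (List (Int × Int))) : Prop := out = check_for_copies_without_date_alt file_list
instance (file_list : List (List (String × Option String))) (out : Int × Int × (List (Int × Int))) : Decidable (Spec_check_for_copies_without_date file_list out) := by unfold Spec_check_for_copies_without_date; infer_instance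

-- ===== CLAIM (what is proved, stated in full; the proofs are below) =====
def Claim_equal_check_for_copies_without_date : Prop := ∀ (file_list : List (List (String × Option String))), Dom_check_for_copies_without_date file_list → Pre_check_for_copies_without_date file_list → Spec_check_for_copies_without_date file_list (check_for_copies_without_date file_list)

-- ===== LEMMAS AND PROOFS =====

-- B's first-occurrence scan '[h for i, h in enumerate(xs) if h not in xs[:i]]' is set(xs) in
-- first-occurrence order.
lemma pv_firstOcc {α : Type} [BEq α] [LawfulBEq α] (xs : List α) :
    ((PySem.List.enumerate xs).filter
        (fun p => !((xs.take p.1.toNat).contains p.2))).map (fun p => p.2)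
      = PySem.Set.ofList xs := by
  induction xs using List.reverseRecOn with
  | nil => rfl
  | append_singleton xs x ih =>
    rw [PySem.List.enumerate_append, List.filter_append, List.map_append,
        PySem.Set.ofList_append_singleton]
    have h1 : (PySem.List.enumerate xs 0).filter
        (fun p => !(((xs ++ [x]).take p.1.toNat).contains p.2))
        = (PySem.List.enumerate xs 0).filter
        (fun p => !((xs.take p.1.toNat).contains p.2)) := by
      apply List.filter_congr
      intro p hp
      rw [PySem.List.mem_enumerate_iff] at hp
      obtain ⟨k, hk, rfl⟩ := hp
      have hto : ((0 : Int) + (k : Int)).toNat = k := by omega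
      rw [hto, List.take_append_of_le_length (le_of_lt hk)]
    rw [h1, ih]
    have h2 : PySem.List.enumerate [x] (0 + (xs.length : Int)) = [((xs.length : Int), x)] := by
      simp [PySem.List.enumerate_cons, PySem.List.enumerate_nil]
    rw [h2]
    have hto : ((xs.length : Int)).toNat = xs.length := by omega
    have h3 : (xs ++ [x]).take xs.length = xs := by
      simp [List.take_append_of_le_length (le_refl xs.length)]
    by_cases hx : x ∈ xs <;>
      simp [List.filter, hto, h3, PySem.Set.add, hx]

-- A's second loop, once every group passes the all() test, splits into the histogram fold and a length count.
lemma pv_loop_split (gs : List (List (List (String × Option String))))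
    (h : ∀ g ∈ gs, g.all (fun x => pvHasDate x) = true) :
    ∀ (d0 : PySem.Dict Int Int) (s m : Int),
    gs.foldl
      (fun (st : PySem.Dict Int Int × Int × Int) group =>
        let gl := st.1.insert (group.length : Int) (st.1.getD (group.length : Int) 0 + 1)
        if group.all (fun g => pvHasDate g) then (gl, st.2.1 + 1, st.2.2)
        else (gl, st.2.1, st.2.2 + 1))
      (d0, s, m)
    = (gs.foldl (fun d g => d.insert (g.length : Int) (d.getD (g.length : Int) 0 + 1)) d0,
       s + gs.length, m) := by
  induction gs with
  | nil => intro d0 s m; simp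
  | cons g gs ih =>
    intro d0 s m
    have hg := h g (by simp)
    have hrest : ∀ g' ∈ gs, g'.all (fun x => pvHasDate x) = true := fun g' hm => h g' (by simp [hm])
    simp only [List.foldl_cons, hg, if_true, ih hrest, List.length_cons]
    congr 2
    push_cast
    ring

theorem check_for_copies_without_date_spec : Claim_equal_check_for_copies_without_date := by
  intro fl _ _
  show check_for_copies_without_date fl = check_for_copies_without_date_alt fl
  unfold check_for_copies_without_date check_for_copies_without_date_alt
  simp only []
  set fl2 := fl.filter (fun n => pvHasDate n) with hfl2
  set hashes := fl2.map (fun img => pvHashKey img) with hhashes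
  set hg := fl2.foldl (fun d img => d.modify (pvHashKey img) [] (fun g => g ++ [img]))
      (PySem.Dict.empty : PySem.Dict (Option String) (List (List (String × Option String)))) with hhg
  have hkeys : hg.keys = PySem.Set.ofList hashes := by
    have := PySem.Dict.keys_foldl_modify_key fl2 (fun img => pvHashKey img) []
      (fun _ img g => g ++ [img])
      (PySem.Dict.empty : PySem.Dict (Option String) (List (List (String × Option String))))
    simpa [PySem.Set.update_nil_left] using this
  have hnodup : hg.keys.Nodup := by rw [hkeys]; exact PySem.Set.nodup_ofList _
  have hpairfold : hg = (fl2.map (fun i => (pvHashKey i, i))).foldl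
      (fun d p => d.modify p.1 [] (fun g => g ++ [p.2])) PySem.Dict.empty := by
    rw [List.foldl_map]
  have hgetD : ∀ k, hg.getD k [] = fl2.filter (fun i => pvHashKey i == k) := by
    intro k
    rw [hpairfold, PySem.Dict.getD_foldl_modify_append]
    simp [List.filter_map, List.map_map, Function.comp_def]
  have hvals : hg.values = (PySem.Set.ofList hashes).map
      (fun k => fl2.filter (fun i => pvHashKey i == k)) := by
    rw [PySem.Dict.values_eq_map_keys hg hnodup [], hkeys]
    simp only [hgetD]
  have hall : ∀ g ∈ hg.values, g.all (fun x => pvHasDate x) = true := by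
    rw [hvals]
    intro g hgmem
    simp only [List.mem_map] at hgmem
    obtain ⟨k, -, rfl⟩ := hgmem
    rw [List.all_eq_true]
    intro x hx
    have hx2 : x ∈ fl2 := (List.mem_filter.mp hx).1
    exact (List.mem_filter.mp (hfl2 ▸ hx2)).2
  rw [pv_loop_split hg.values hall]
  have hcount : ∀ k, (fl2.filter (fun i => pvHashKey i == k)).length = hashes.count k := by
    intro k
    rw [hhashes, List.count_eq_countP, List.countP_map, ← List.countP_eq_length_filter]
    rfl
  -- B's pieces
  have hfirsts : ((PySem.List.enumerate hashes).filter
      (fun p => !((hashes.take p.1.toNat).contains p.2))).map (fun p => p.2)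
      = PySem.Set.ofList hashes := pv_firstOcc hashes
  have hsizes : (PySem.Set.ofList hashes).map (fun h => (PySem.List.count hashes h : Int))
      = hg.values.map (fun g => (g.length : Int)) := by
    rw [hvals, List.map_map]
    apply List.map_congr_left
    intro k _
    simp [PySem.List.count_eq, hcount k]
  set sizes := (PySem.Set.ofList hashes).map (fun h => (PySem.List.count hashes h : Int))
    with hsz
  have huniq : ((PySem.List.enumerate sizes).filter
      (fun p => !((sizes.take p.1.toNat).contains p.2))).map (fun p => p.2)
      = PySem.Set.ofList sizes := pv_firstOcc sizes
  have hhist : hg.values.foldl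
      (fun d g => d.insert (g.length : Int) (d.getD (g.length : Int) 0 + 1)) PySem.Dict.empty
      = PySem.Dict.counter sizes := by
    rw [hsizes, ← PySem.Dict.foldl_insert_getD_add_one_eq_counter, List.foldl_map]
  have hlen : (PySem.Set.ofList hashes).length = hg.values.length := by
    have h1 : (PySem.Set.ofList hashes).length = sizes.length := by rw [hsz]; simp
    have h2 : sizes.length = hg.values.length := by rw [hsizes]; simp
    omega
  rw [hfirsts, huniq, hhist, PySem.Dict.items_counter]
  simp only [Prod.mk.injEq]
  refine ⟨by simp [hlen], trivial, ?_⟩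
  apply List.map_congr_left
  intro c _
  simp only [PySem.List.count_eq]
  rw [show List.map (fun h => ((List.count h hashes : Nat) : Int)) (PySem.Set.ofList hashes) = sizes from by
    rw [hsz]; simp [PySem.List.count_eq]]
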